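-- pv_equiv track=rewrite | github.com/brighta/advent-of-code-python | 2025/day_03/part1.py | getLargestJoltage
-- ===== SOURCE A (Python) =====
-- def getLargestJoltage(bank):
--     largestJoltage = 0
--     for i in range(len(bank) - 1):
--         for j in range(i + 1, len(bank)):
--             number = bank[i] * 10 + bank[j]
--             if largestJoltage < number:
--                 largestJoltage = number
--     return largestJoltage
-- ===== SOURCE B (Python) =====
-- def getLargestJoltage(bank):
--     best = 0
--     prefmax = None
--     for x in bank:
--         if prefmax is not None:
--             best = max(best, prefmax * 10 + x)
--             prefmax = max(prefmax, x)
--         else: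
--             prefmax = x
--     return best
-- ===== Notes on version B (the rewrite author's own statement) =====
-- stated objective: faster
-- what changed: replaced the nested all-pairs scan by a single pass that keeps the running maximum of earlier elements (prefix max), so each element is combined only with the best possible left partner
import Mathlib
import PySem

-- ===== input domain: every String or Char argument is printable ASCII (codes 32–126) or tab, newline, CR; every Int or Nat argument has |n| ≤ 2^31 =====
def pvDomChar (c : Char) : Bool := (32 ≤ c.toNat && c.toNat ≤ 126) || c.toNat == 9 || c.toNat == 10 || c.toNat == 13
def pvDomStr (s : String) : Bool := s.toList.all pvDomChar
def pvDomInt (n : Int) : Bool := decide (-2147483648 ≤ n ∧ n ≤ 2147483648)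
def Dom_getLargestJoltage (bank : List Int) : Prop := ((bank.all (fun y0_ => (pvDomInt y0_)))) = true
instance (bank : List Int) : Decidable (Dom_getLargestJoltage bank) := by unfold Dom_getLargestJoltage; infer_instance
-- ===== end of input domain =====

-- B replaces A's O(n^2) all-pairs scan by one O(n) pass keeping the running prefix maximum.

-- ===== PORT A =====
-- nested loops: for i in range(len-1): for j in range(i+1, len): max-update
def getLargestJoltage (bank : List Int) : Int :=
  (PySem.List.pyRange 0 ((bank.length : Int) - 1) 1).foldl
    (fun L i =>
      (PySem.List.pyRange (i + 1) (bank.length : Int) 1).foldl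
        (fun L j =>
          let number := PySem.List.pyGetD bank i 0 * 10 + PySem.List.pyGetD bank j 0
          if L < number then number else L)
        L)
    0

-- ===== PORT B =====
-- single pass; state = (best so far, max of elements seen so far : Option Int)
def getLargestJoltage_alt (bank : List Int) : Int :=
  (bank.foldl
    (fun (s : Int × Option Int) x =>
      match s.2 with
      | some p => (max s.1 (p * 10 + x), some (max p x))
      | none => (s.1, some x))
    (0, none)).1

-- ===== PRECONDITION & SPEC =====
def Spec_getLargestJoltage (bank : List Int) (out : Int) : Prop := out = getLargestJoltage_alt bank
instance (bank : List Int) (out : Int) : Decidable (Spec_getLargestJoltage bank out) := by unfold Spec_getLargestJoltage; infer_instance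

-- ===== CLAIM (what is proved, stated in full; the proofs are below) =====
def Claim_equal_getLargestJoltage : Prop := ∀ (bank : List Int), Dom_getLargestJoltage bank → Spec_getLargestJoltage bank (getLargestJoltage bank)

-- ===== LEMMAS AND PROOFS =====

-- structural form of A's computation: peel the first element, fold its pairs, recurse
def pairBest : List Int → Int → Int
  | [], acc => acc
  | x :: xs, acc => pairBest xs (xs.foldl (fun a y => max a (x * 10 + y)) acc)

theorem if_lt_eq_max (a b : Int) : (if a < b then b else a) = max a b := by
  rw [max_def]; split_ifs <;> omega

theorem pairBest_short (l : List Int) (acc : Int) (h : l.length ≤ 1) :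
    pairBest l acc = acc := by
  match l with
  | [] => rfl
  | [x] => simp [pairBest]
  | x :: y :: t => simp at h

-- pull an already-maxed summand out of a running-max fold
theorem foldl_max_pull (u : Int → Int) (l : List Int) :
    ∀ (A B : Int), l.foldl (fun a y => max a (u y)) (max A B)
      = max A (l.foldl (fun a y => max a (u y)) B) := by
  induction l with
  | nil => intro A B; simp
  | cons y s ih =>
    intro A B
    simp only [List.foldl_cons]
    rw [max_assoc, ih]

-- two successive running-max folds over the same list fuse into one
theorem foldl_max_fuse (u v : Int → Int) (t : List Int) :
    ∀ (A : Int),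
      t.foldl (fun a y => max a (v y)) (t.foldl (fun a y => max a (u y)) A)
      = t.foldl (fun a y => max a (max (u y) (v y))) A := by
  induction t with
  | nil => intro A; simp
  | cons y s ih =>
    intro A
    simp only [List.foldl_cons]
    have h1 : max (s.foldl (fun a y => max a (u y)) (max A (u y))) (v y)
        = s.foldl (fun a y => max a (u y)) (max (v y) (max A (u y))) := by
      rw [max_comm]
      exact (foldl_max_pull u s (v y) (max A (u y))).symm
    rw [h1]
    have h2 : max (v y) (max A (u y)) = max A (max (u y) (v y)) := by
      rw [max_comm (v y), max_assoc]
    rw [h2, ih]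

theorem max_mul_ten_add (p x y : Int) :
    max (p * 10 + y) (x * 10 + y) = max p x * 10 + y := by
  rcases le_total p x with h | h
  · rw [max_eq_right h, max_eq_right (by omega)]
  · rw [max_eq_left h, max_eq_left (by omega)]

-- B's loop invariant: starting from best and prefix max p, the fold computes pairBest (p :: rest)
theorem alt_inv (t : List Int) :
    ∀ (p best : Int),
      (t.foldl
        (fun (s : Int × Option Int) x =>
          match s.2 with
          | some q => (max s.1 (q * 10 + x), some (max q x))
          | none => (s.1, some x))
        (best, some p)).1
      = pairBest (p :: t) best := by
  induction t with
  | nil => intro p best; simp [pairBest]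
  | cons x s ih =>
    intro p best
    simp only [List.foldl_cons]
    rw [ih (max p x) (max best (p * 10 + x))]
    show pairBest s (s.foldl (fun a y => max a (max p x * 10 + y)) (max best (p * 10 + x)))
      = pairBest s (s.foldl (fun a y => max a (x * 10 + y))
          ((x :: s).foldl (fun a y => max a (p * 10 + y)) best))
    congr 1
    simp only [List.foldl_cons]
    rw [foldl_max_fuse (fun y => p * 10 + y) (fun y => x * 10 + y) s]
    refine PySem.List.foldl_congr_mem _ _ _ _ ?_
    intro a y _
    rw [max_mul_ten_add]

-- A's outer loop from index k computes pairBest of the k-suffix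
theorem a_outer (bank : List Int) :
    ∀ (m k : Nat) (acc : Int), bank.length - k ≤ m →
      (PySem.List.pyRange (k : Int) ((bank.length : Int) - 1) 1).foldl
        (fun L i =>
          (PySem.List.pyRange (i + 1) (bank.length : Int) 1).foldl
            (fun L j =>
              let number := PySem.List.pyGetD bank i 0 * 10 + PySem.List.pyGetD bank j 0
              if L < number then number else L)
            L)
        acc
      = pairBest (bank.drop k) acc := by
  intro m
  induction m with
  | zero =>
    intro k acc hm
    have hk : bank.length ≤ k := by omega
    rw [PySem.List.pyRange_one_eq_nil (by omega : ((bank.length : Int) - 1) ≤ (k : Int))]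
    rw [List.drop_of_length_le hk]
    rfl
  | succ m ih =>
    intro k acc hm
    by_cases hk : bank.length ≤ k + 1
    · rw [PySem.List.pyRange_one_eq_nil (by omega : ((bank.length : Int) - 1) ≤ (k : Int))]
      exact (pairBest_short _ _ (by simp; omega)).symm
    · rw [not_le] at hk
      have hklt : k < bank.length := by omega
      rw [PySem.List.pyRange_one_cons (by omega : (k : Int) < (bank.length : Int) - 1)]
      simp only [List.foldl_cons]
      have hdrop : bank.drop k = bank[k] :: bank.drop (k + 1) :=
        List.drop_eq_getElem_cons hklt
      rw [hdrop]
      show _ = pairBest (bank.drop (k + 1))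
        ((bank.drop (k + 1)).foldl (fun a y => max a (bank[k] * 10 + y)) acc)
      have hinner :
          (PySem.List.pyRange ((k : Int) + 1) (bank.length : Int) 1).foldl
            (fun L j =>
              let number := PySem.List.pyGetD bank (k : Int) 0 * 10 + PySem.List.pyGetD bank j 0
              if L < number then number else L)
            acc
          = (bank.drop (k + 1)).foldl (fun a y => max a (bank[k] * 10 + y)) acc := by
        have := PySem.List.foldl_pyRange_pyGetD' bank 0
          (fun L y => if L < PySem.List.pyGetD bank (k : Int) 0 * 10 + y
            then PySem.List.pyGetD bank (k : Int) 0 * 10 + y else L)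
          acc (a := (k : Int) + 1) (by omega)
        simp only at this
        rw [this]
        have htn : ((k : Int) + 1).toNat = k + 1 := by omega
        rw [htn]
        refine PySem.List.foldl_congr_mem _ _ _ _ ?_
        intro a y _
        simp only [if_lt_eq_max, PySem.List.pyGetD_natCast, List.getD_eq_getElem bank 0 hklt]
      rw [hinner]
      have hcast : (k : Int) + 1 = ((k + 1 : Nat) : Int) := by push_cast; ring
      rw [hcast, ih (k + 1) _ (by omega)]

theorem a_eq_pairBest (bank : List Int) : getLargestJoltage bank = pairBest bank 0 := by
  have := a_outer bank bank.length 0 0 (by omega)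
  simpa using this

-- ===== VERDICT (by name: the statement is the Claim_ definition above) =====
theorem getLargestJoltage_spec : Claim_equal_getLargestJoltage := by
  intro bank _
  show getLargestJoltage bank = getLargestJoltage_alt bank
  rw [a_eq_pairBest]
  cases bank with
  | nil => rfl
  | cons b bs =>
    unfold getLargestJoltage_alt
    simp only [List.foldl_cons]
    rw [alt_inv bs b 0]
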